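-- pv_equiv track=rewrite | github.com/Envision-Perdido/EnvisionPerdido | scripts/dev/profile_inference.py | generate_sample_texts
-- ===== SOURCE A (Python) =====
-- from typing import List
--
-- def generate_sample_texts(n_samples: int = 100) -> List[str]:
--     """Generate sample event descriptions for profiling.
--
--     Args:
--         n_samples: Number of samples to generate
--
--     Returns:
--         List of sample text strings.
--     """
--     titles = [
--         "Community Center Meeting",
--         "Summer Music Festival",
--         "Beach Cleanup Day",
--         "Farmer's Market Opening",
--         "Youth Sports Tournament",
--         "Library Book Club",
--         "Church Charity Event",
--         "Park Picnic Gathering",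
--         "School Fundraiser Dinner",
--         "Art Exhibition Opening",
--     ]
--
--     descriptions = [
--         "Join us for a fun community gathering with music and refreshments",
--         "Annual celebration featuring local artisans and performers",
--         "Help clean our beautiful beaches and local parks",
--         "Fresh produce directly from local farmers",
--         "Youth compete in various athletic competitions",
--         "Monthly discussion of featured books",
--         "Charity event supporting local causes",
--         "Bring your family for food and games",
--         "Help support our school programs",
--         "View works from regional artists",
--     ]
--
--     samples = []
--     for i in range(n_samples):
--         title = titles[i % len(titles)]
--         description = descriptions[i % len(descriptions)]
--         text = f"{title}. {description}"
--         samples.append(text)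
--
--     return samples
-- ===== SOURCE B (Python) =====
-- from typing import List
--
-- def generate_sample_texts(n_samples: int = 100) -> List[str]:
--     """Generate sample event descriptions for profiling (replicate-and-truncate)."""
--     titles = [
--         "Community Center Meeting",
--         "Summer Music Festival",
--         "Beach Cleanup Day",
--         "Farmer's Market Opening",
--         "Youth Sports Tournament",
--         "Library Book Club",
--         "Church Charity Event",
--         "Park Picnic Gathering",
--         "School Fundraiser Dinner",
--         "Art Exhibition Opening",
--     ]
--
--     descriptions = [
--         "Join us for a fun community gathering with music and refreshments",
--         "Annual celebration featuring local artisans and performers",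
--         "Help clean our beautiful beaches and local parks",
--         "Fresh produce directly from local farmers",
--         "Youth compete in various athletic competitions",
--         "Monthly discussion of featured books",
--         "Charity event supporting local causes",
--         "Bring your family for food and games",
--         "Help support our school programs",
--         "View works from regional artists",
--     ]
--
--     templates = [f"{t}. {d}" for t, d in zip(titles, descriptions)]
--     reps = (n_samples + len(templates) - 1) // len(templates)
--     return (templates * reps)[:n_samples]
-- ===== Notes on version B (the rewrite author's own statement) =====
-- stated objective: faster
-- what changed: A indexes into titles and descriptions element by element inside a range loop with two modular lookups and an f-string per item; B zips the two lists into the combined template strings once, then produces the result by list replication of that cycle and a truncating slice, with no per-index arithmetic.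
import Mathlib
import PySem

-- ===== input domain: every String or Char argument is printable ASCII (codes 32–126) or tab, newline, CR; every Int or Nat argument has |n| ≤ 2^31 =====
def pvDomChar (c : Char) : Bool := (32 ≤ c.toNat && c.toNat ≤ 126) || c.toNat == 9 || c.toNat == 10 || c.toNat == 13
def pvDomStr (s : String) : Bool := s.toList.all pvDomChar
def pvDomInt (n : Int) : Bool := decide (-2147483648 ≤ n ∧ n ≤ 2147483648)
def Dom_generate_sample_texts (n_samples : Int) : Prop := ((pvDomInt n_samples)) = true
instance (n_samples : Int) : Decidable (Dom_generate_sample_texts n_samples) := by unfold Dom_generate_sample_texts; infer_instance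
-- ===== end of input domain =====

-- B replaces A's per-index modular loop by building the 10 combined templates once (zip),
-- replicating the cycle and truncating (list multiplication + slice): a different decomposition.


-- the two literal lists both Python sources carry verbatim
def pvTitles : List String := [
  "Community Center Meeting",
  "Summer Music Festival",
  "Beach Cleanup Day",
  "Farmer's Market Opening",
  "Youth Sports Tournament",
  "Library Book Club",
  "Church Charity Event",
  "Park Picnic Gathering",
  "School Fundraiser Dinner",
  "Art Exhibition Opening"]

def pvDescriptions : List String := [
  "Join us for a fun community gathering with music and refreshments",
  "Annual celebration featuring local artisans and performers",
  "Help clean our beautiful beaches and local parks",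
  "Fresh produce directly from local farmers",
  "Youth compete in various athletic competitions",
  "Monthly discussion of featured books",
  "Charity event supporting local causes",
  "Bring your family for food and games",
  "Help support our school programs",
  "View works from regional artists"]

-- ===== PORT A =====
-- titles[i % len(titles)] ported as pyGetD with default "": exact here, the index i % 10 is always in range
def generate_sample_texts (n_samples : Int) : List String :=
  (PySem.List.pyRange 0 n_samples 1).foldl
    (fun samples i =>
      samples ++ [PySem.List.pyGetD pvTitles (PySem.Int.mod i (PySem.List.len pvTitles)) ""
                  ++ ". "
                  ++ PySem.List.pyGetD pvDescriptions (PySem.Int.mod i (PySem.List.len pvDescriptions)) ""]) []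

-- ===== PORT B =====
def generate_sample_texts_alt (n_samples : Int) : List String :=
  let templates := List.zipWith (fun t d => t ++ ". " ++ d) pvTitles pvDescriptions
  let reps := PySem.Int.floordiv (n_samples + PySem.List.len templates - 1) (PySem.List.len templates)
  PySem.List.slice (PySem.List.pyRepeat templates reps) none (some n_samples)

-- ===== PRECONDITION & SPEC =====
def Spec_generate_sample_texts (n_samples : Int) (out : List String) : Prop := out = generate_sample_texts_alt n_samples
instance (n_samples : Int) (out : List String) : Decidable (Spec_generate_sample_texts n_samples out) := by unfold Spec_generate_sample_texts; infer_instance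

-- ===== CLAIM (what is proved, stated in full; the proofs are below) =====
def Claim_equal_generate_sample_texts : Prop := ∀ (n_samples : Int), Dom_generate_sample_texts n_samples → Spec_generate_sample_texts n_samples (generate_sample_texts n_samples)

-- ===== LEMMAS AND PROOFS =====

-- the common cyclic element both programs produce at position k
def pvTemplates : List String := List.zipWith (fun t d => t ++ ". " ++ d) pvTitles pvDescriptions

def pvCycle (k : Nat) : String := pvTemplates.getD (k % 10) ""

lemma pvTemplates_getD (j : Nat) (hj : j < 10) :
    pvTemplates.getD j "" = pvTitles.getD j "" ++ ". " ++ pvDescriptions.getD j "" := by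
  interval_cases j <;> rfl

-- a prefix of a list, read through getD with in-range indices
lemma take_eq_map_range {α : Type} (ts : List α) (d : α) (m : Nat) (hm : m ≤ ts.length) :
    ts.take m = (List.range m).map (fun k => ts.getD (k % ts.length) d) := by
  apply List.ext_getElem
  · simp [Nat.min_eq_left hm]
  · intro i h1 h2
    have him : i < m := by simpa using h2
    have hil : i < ts.length := lt_of_lt_of_le him hm
    simp [List.getElem_take, Nat.mod_eq_of_lt hil, List.getD_eq_getElem?_getD,
      List.getElem?_eq_getElem hil]

lemma take_flatten_replicate {α : Type} (ts : List α) (d : α) :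
    ∀ (r m : Nat), m ≤ r * ts.length →
    (List.replicate r ts).flatten.take m
      = (List.range m).map (fun k => ts.getD (k % ts.length) d) := by
  intro r
  induction r with
  | zero =>
    intro m hm
    have : m = 0 := by omega
    subst this; simp
  | succ r ih =>
    intro m hm
    rw [List.replicate_succ, List.flatten_cons]
    by_cases hcase : m ≤ ts.length
    · rw [List.take_append_of_le_length hcase, take_eq_map_range ts d m hcase]
    · replace hcase : ts.length < m := by omega
      have hrest : m - ts.length ≤ r * ts.length := by
        have : m ≤ r * ts.length + ts.length := by
          simpa [Nat.succ_mul] using hm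
        omega
      rw [List.take_append, List.take_of_length_le (le_of_lt hcase), ih _ hrest]
      have hsplit : m = ts.length + (m - ts.length) := by omega
      conv_rhs => rw [hsplit, List.range_add, List.map_append, List.map_map]
      congr 1
      · have h := take_eq_map_range ts d ts.length le_rfl
        rwa [List.take_length] at h
      · refine (List.map_congr_left ?_).symm
        intro k _
        simp [Nat.add_mod_left]

lemma lemA (n : Int) : generate_sample_texts n = (List.range n.toNat).map pvCycle := by
  unfold generate_sample_texts
  rw [PySem.List.foldl_append_singleton_eq_map, PySem.List.pyRange_one, List.map_map]
  simp only [List.nil_append, sub_zero]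
  apply List.map_congr_left
  intro k _
  have ht : pvTitles.length = 10 := rfl
  have hd : pvDescriptions.length = 10 := rfl
  simp only [Function.comp, zero_add, PySem.List.len, ht, hd, PySem.Int.mod_natCast,
    PySem.List.pyGetD_natCast]
  exact (pvTemplates_getD (k % 10) (Nat.mod_lt k (by norm_num))).symm

lemma lemB (n : Int) : generate_sample_texts_alt n = (List.range n.toNat).map pvCycle := by
  unfold generate_sample_texts_alt
  simp only []
  have hlen : PySem.List.len (List.zipWith (fun t d => t ++ ". " ++ d) pvTitles pvDescriptions) = 10 := rfl
  rw [hlen]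
  set fd : Int := PySem.Int.floordiv (n + 10 - 1) 10 with hfd
  by_cases hn : n ≤ 0
  · have h9 : n + 10 - 1 < 10 := by omega
    have : fd < 1 := by
      rw [hfd, PySem.Int.floordiv_lt_iff_lt_mul (by norm_num)]
      omega
    have hz : fd.toNat = 0 := by omega
    have hnz : n.toNat = 0 := by omega
    simp [PySem.List.pyRepeat, hz, hnz, PySem.List.slice]
  · replace hn : 0 < n := by omega
    have hmul : fd * 10 + PySem.Int.mod (n + 10 - 1) 10 = n + 10 - 1 :=
      PySem.Int.floordiv_mul_add_mod _ _
    have hm0 : 0 ≤ PySem.Int.mod (n + 10 - 1) 10 := PySem.Int.mod_nonneg _ (by norm_num)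
    have hm1 : PySem.Int.mod (n + 10 - 1) 10 < 10 := PySem.Int.mod_lt _ (by norm_num)
    have hge : n ≤ fd * 10 := by omega
    have hfd0 : 0 ≤ fd := by nlinarith
    have hmle : n.toNat ≤ fd.toNat * 10 := by omega
    rw [PySem.List.slice_to _ (le_of_lt hn), PySem.List.pyRepeat]
    have h10 : (List.zipWith (fun t d => t ++ ". " ++ d) pvTitles pvDescriptions).length = 10 := rfl
    have := take_flatten_replicate (List.zipWith (fun t d => t ++ ". " ++ d) pvTitles pvDescriptions)
      "" fd.toNat n.toNat (by rw [h10]; omega)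
    rw [this]
    apply List.map_congr_left
    intro k _
    simp [pvCycle, pvTemplates, h10]

-- ===== VERDICT (by name: the statement is the Claim_ definition above) =====
theorem generate_sample_texts_spec : Claim_equal_generate_sample_texts := by
  intro n _
  unfold Spec_generate_sample_texts
  rw [lemA, lemB]
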